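-- pv_equiv track=rewrite | github.com/Michal0ss/WDI | WDI_algo/kolosy/22/B1_Again.py | find_subseq
-- ===== SOURCE A (Python) =====
-- def find_subseq(t):
--     n=len(t)
--     subseqences=[]
--     start=0
--
--     while start<n:
--         end=start
--         while end + 1 < n and t[end]<t[end+1]:
--             end+=1
--
--         if (start == 0 or t[start-1]>=t[start]) and (end==n-1 or t[end+1]<=t[end]):
--             if end-start+1>2:
--                 subseqences.append((start,end)) # zapisuje tuple
--
--         start=end+1
--     return subseqences
-- ===== SOURCE B (Python) =====
-- def find_subseq(t):
--     n = len(t)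
--     if n == 0:
--         return []
--     bounds = [0] + [i for i in range(1, n) if t[i - 1] >= t[i]] + [n]
--     return [(a, b - 1) for a, b in zip(bounds, bounds[1:]) if b - a > 2]
-- ===== Notes on version B (the rewrite author's own statement) =====
-- stated objective: simpler
-- what changed: Replaces A's nested start-jumping while loops (inner run-extension plus always-true boundary guards) with a single comprehension collecting descent boundaries i where t[i-1]>=t[i], then zipping consecutive boundaries and keeping runs longer than 2.
import Mathlib
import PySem

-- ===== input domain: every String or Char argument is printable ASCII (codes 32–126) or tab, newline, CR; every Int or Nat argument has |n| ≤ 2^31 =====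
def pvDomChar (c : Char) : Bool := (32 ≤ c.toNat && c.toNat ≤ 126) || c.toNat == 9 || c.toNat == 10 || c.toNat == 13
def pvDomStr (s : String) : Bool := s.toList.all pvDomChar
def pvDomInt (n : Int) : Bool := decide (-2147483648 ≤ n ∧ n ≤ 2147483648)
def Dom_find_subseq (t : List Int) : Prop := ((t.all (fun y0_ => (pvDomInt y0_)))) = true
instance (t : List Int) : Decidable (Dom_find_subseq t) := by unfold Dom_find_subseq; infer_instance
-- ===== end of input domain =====

-- B replaces A's nested start-jumping while loops by one comprehension of descent boundaries
-- zipped into consecutive pairs (objective: simpler); same O(n) cost.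

-- ===== PORT A =====
-- inner 'while end+1<n and t[end]<t[end+1]: end+=1'.  Every index Python reads here is
-- guarded to be in range, so Nat indices with List.getD are exact.
def extA (t : List Int) (e : Nat) : Nat :=
  if _ : e + 1 < t.length ∧ t.getD e 0 < t.getD (e + 1) 0 then extA t (e + 1) else e
termination_by t.length - e
decreasing_by omega

-- needed by loopA's termination proof
theorem extA_ge (t : List Int) (e : Nat) : e ≤ extA t e := by
  induction e using extA.induct t with
  | case1 e h ih => rw [extA, dif_pos h]; omega
  | case2 e h => rw [extA, dif_neg h]

-- outer 'while start<n' loop; Nat subtraction in 'end-start+1 > 2' matches Python because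
-- the comparison is equivalent either way (both sides false when end < start).
def loopA (t : List Int) (start : Nat) (acc : List (Int × Int)) : List (Int × Int) :=
  if _ : start < t.length then
    loopA t (extA t start + 1)
      (if (start = 0 ∨ t.getD (start - 1) 0 ≥ t.getD start 0) ∧
          (extA t start = t.length - 1 ∨ t.getD (extA t start + 1) 0 ≤ t.getD (extA t start) 0) then
        (if extA t start - start + 1 > 2 then acc ++ [((start : Int), (extA t start : Int))] else acc)
      else acc)
  else acc
termination_by t.length - start
decreasing_by have := extA_ge t start; omega

def find_subseq (t : List Int) : List (Int × Int) := loopA t 0 []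

-- ===== PORT B =====
-- the comprehension condition 't[i-1] >= t[i]' (indices always in range, getD exact)
def isBreak (t : List Int) (i : Nat) : Bool := decide (t.getD (i - 1) 0 ≥ t.getD i 0)

def find_subseq_alt (t : List Int) : List (Int × Int) :=
  let n := t.length
  if n = 0 then []
  else
    let bounds : List Nat := 0 :: (List.range' 1 (n - 1)).filter (isBreak t) ++ [n]
    (bounds.zip bounds.tail).filterMap
      (fun ab => if ab.2 - ab.1 > 2 then some ((ab.1 : Int), (ab.2 : Int) - 1) else none)

-- ===== PRECONDITION & SPEC =====
def Spec_find_subseq (t : List Int) (out : List (Int × Int)) : Prop := out = find_subseq_alt t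
instance (t : List Int) (out : List (Int × Int)) : Decidable (Spec_find_subseq t out) := by unfold Spec_find_subseq; infer_instance

-- ===== CLAIM (what is proved, stated in full; the proofs are below) =====
def Claim_equal_find_subseq : Prop := ∀ (t : List Int), Dom_find_subseq t → Spec_find_subseq t (find_subseq t)

-- ===== LEMMAS AND PROOFS =====

-- B's pairing step, named for the proofs
def pvPairs (bounds : List Nat) : List (Int × Int) :=
  (bounds.zip bounds.tail).filterMap
    (fun ab => if ab.2 - ab.1 > 2 then some ((ab.1 : Int), (ab.2 : Int) - 1) else none)

theorem pvPairs_cons₂ (a b : Nat) (l : List Nat) :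
    pvPairs (a :: b :: l) =
      (if b - a > 2 then [((a : Int), (b : Int) - 1)] else []) ++ pvPairs (b :: l) := by
  by_cases h : b - a > 2 <;> simp [pvPairs, h]

theorem pvPairs_single (a : Nat) : pvPairs [a] = [] := by simp [pvPairs]

theorem extA_lt (t : List Int) (e : Nat) : e < t.length → extA t e < t.length := by
  induction e using extA.induct t with
  | case1 e h ih => intro _; rw [extA, dif_pos h]; exact ih h.1
  | case2 e h => intro he; rw [extA, dif_neg h]; exact he

theorem extA_exit (t : List Int) (e : Nat) :
    extA t e + 1 < t.length → t.getD (extA t e + 1) 0 ≤ t.getD (extA t e) 0 := by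
  induction e using extA.induct t with
  | case1 e h ih => rw [extA, dif_pos h]; exact ih
  | case2 e h =>
      rw [extA, dif_neg h]; intro h2
      push_neg at h
      exact h h2

-- the descent boundaries after s are exactly: extA t s + 1 (if in range) and the rest
theorem breaks_from (t : List Int) (s : Nat) :
    (List.range' (s + 1) (t.length - (s + 1))).filter (isBreak t) =
      if extA t s + 1 < t.length then
        (extA t s + 1) ::
          (List.range' (extA t s + 2) (t.length - (extA t s + 2))).filter (isBreak t)
      else [] := by
  induction s using extA.induct t with
  | case1 s h ih =>
      rw [extA, dif_pos h]
      have hn : t.length - (s + 1) = (t.length - (s + 2)) + 1 := by omega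
      rw [hn, show List.range' (s+1) ((t.length - (s+2)) + 1) = (s+1) :: List.range' (s+2) (t.length - (s+2)) from rfl]
      have hb : isBreak t (s + 1) = false := by
        simp [isBreak]
        simpa using h.2
      rw [List.filter_cons_of_neg (by simp [hb])]
      exact ih
  | case2 s h =>
      rw [extA, dif_neg h]
      by_cases hs : s + 1 < t.length
      · have hn : t.length - (s + 1) = (t.length - (s + 2)) + 1 := by omega
        rw [hn, show List.range' (s+1) ((t.length - (s+2)) + 1) = (s+1) :: List.range' (s+2) (t.length - (s+2)) from rfl]
        have hb : isBreak t (s + 1) = true := by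
          push_neg at h
          simp [isBreak]
          simpa using h hs
        rw [List.filter_cons_of_pos (by simp [hb]), if_pos hs]
      · rw [if_neg hs, show t.length - (s + 1) = 0 from by omega]
        simp
-- main invariant: from any resumption point s, A's loop appends exactly B's pairs
theorem loopA_eq (t : List Int) :
    ∀ (k s : Nat) (acc : List (Int × Int)), t.length - s ≤ k → s ≤ t.length →
      (s < t.length → (s = 0 ∨ t.getD (s - 1) 0 ≥ t.getD s 0)) →
      loopA t s acc =
        acc ++ pvPairs (s :: (List.range' (s + 1) (t.length - (s + 1))).filter (isBreak t) ++ [t.length]) := by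
  intro k
  induction k with
  | zero =>
      intro s acc hk hs _
      have : s = t.length := by omega
      subst this
      rw [loopA, dif_neg (by omega)]
      rw [show t.length - (t.length + 1) = 0 from by omega]
      simp [pvPairs_cons₂, pvPairs_single]
  | succ k ih =>
      intro s acc hk hs hinv
      by_cases hlt : s < t.length
      · rw [loopA, dif_pos hlt]
        have hge := extA_ge t s
        have hel := extA_lt t s hlt
        set e := extA t s with he
        have hguard : (s = 0 ∨ t.getD (s - 1) 0 ≥ t.getD s 0) ∧
            (e = t.length - 1 ∨ t.getD (e + 1) 0 ≤ t.getD e 0) := by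
          refine ⟨hinv hlt, ?_⟩
          by_cases h1 : e + 1 < t.length
          · exact Or.inr (extA_exit t s h1)
          · exact Or.inl (by omega)
        rw [if_pos hguard, breaks_from t s, ← he]
        by_cases h1 : e + 1 < t.length
        · rw [if_pos h1]
          have hrec := ih (e + 1) (if e - s + 1 > 2 then acc ++ [((s : Int), (e : Int))] else acc)
            (by omega) (by omega)
            (fun _ => Or.inr (by simpa using extA_exit t s h1))
          have h3 : e + 1 + 1 = e + 2 := rfl
          rw [h3] at hrec
          rw [hrec]
          simp only [List.cons_append]
          rw [pvPairs_cons₂ s (e + 1)]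
          have hval : ((e + 1 : Nat) : Int) - 1 = (e : Int) := by push_cast; ring
          by_cases h2 : e - s + 1 > 2
          · rw [if_pos h2, if_pos (show e + 1 - s > 2 by omega), hval]; simp
          · rw [if_neg h2, if_neg (show ¬(e + 1 - s > 2) by omega)]; simp
        · rw [if_neg h1]
          have hen : e = t.length - 1 := by omega
          rw [loopA, dif_neg (by omega)]
          simp only [List.singleton_append]
          rw [show ([s, t.length] : List Nat) = s :: t.length :: [] from rfl,
             pvPairs_cons₂ s t.length, pvPairs_single]
          have hval : ((t.length : Nat) : Int) - 1 = (e : Int) := by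
            have h4 : e + 1 = t.length := by omega
            push_cast [← h4]; ring
          by_cases h2 : e - s + 1 > 2
          · rw [if_pos h2, if_pos (show t.length - s > 2 by omega), hval]; simp
          · rw [if_neg h2, if_neg (show ¬(t.length - s > 2) by omega)]; simp
      · have : s = t.length := by omega
        subst this
        rw [loopA, dif_neg (by omega)]
        rw [show t.length - (t.length + 1) = 0 from by omega]
        simp [pvPairs_cons₂, pvPairs_single]

-- ===== VERDICT (by name: the statement is the Claim_ definition above) =====
theorem find_subseq_spec : Claim_equal_find_subseq := by
  intro t _
  unfold Spec_find_subseq find_subseq find_subseq_alt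
  by_cases h0 : t.length = 0
  · rw [loopA, dif_neg (by omega)]
    simp [h0]
  · rw [if_neg h0]
    have := loopA_eq t t.length 0 [] (by omega) (by omega) (fun _ => Or.inl rfl)
    rw [this]
    simp [pvPairs]
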